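-- pv_equiv track=rewrite | github.com/Hemant-Jain-Author/Problem-Solving-in-Data-Structures-Algorithms-using-Python | IntroductoryChapters/Analysis.py | fun12
-- ===== SOURCE A (Python) =====
-- def fun12(n):
--     m = 0
--     i = 0
--     j = 0
--     while i < n:
--         while j < n:
--             m += 1
--             j += 1
--         i += 1
--     return m
-- ===== SOURCE B (Python) =====
-- def fun12(n):
--     return n if n > 0 else 0
-- ===== Notes on version B (the rewrite author's own statement) =====
-- stated objective: faster
-- what changed: Replaced the nested while-loops counting increments with the closed form max(n, 0), exploiting that j is never reset so the inner loop runs n times total.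
import Mathlib
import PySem

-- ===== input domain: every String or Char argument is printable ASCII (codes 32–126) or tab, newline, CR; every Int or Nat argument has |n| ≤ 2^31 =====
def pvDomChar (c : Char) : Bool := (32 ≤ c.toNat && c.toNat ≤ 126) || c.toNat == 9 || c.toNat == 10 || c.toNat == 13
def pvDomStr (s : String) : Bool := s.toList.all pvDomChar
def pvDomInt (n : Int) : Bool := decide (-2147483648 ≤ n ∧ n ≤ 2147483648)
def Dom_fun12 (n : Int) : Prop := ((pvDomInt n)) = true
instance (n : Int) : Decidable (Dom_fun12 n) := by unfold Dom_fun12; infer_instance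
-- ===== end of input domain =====

-- B replaces the nested loops with the closed form max(n,0) (the inner counter j is never reset): O(1) instead of O(n).

-- ===== PORT A =====
-- inner 'while j < n: m += 1; j += 1', returning updated (m, j)
def fun12Inner (n m j : Int) : Int × Int :=
  if _h : j < n then fun12Inner n (m + 1) (j + 1) else (m, j)
termination_by (n - j).toNat
decreasing_by omega

-- outer 'while i < n: <inner>; i += 1', returning final m
def fun12Outer (n m i j : Int) : Int :=
  if _h : i < n then
    let p := fun12Inner n m j
    fun12Outer n p.1 (i + 1) p.2
  else m
termination_by (n - i).toNat
decreasing_by omega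

def fun12 (n : Int) : Int := fun12Outer n 0 0 0

-- ===== PORT B =====
def fun12_alt (n : Int) : Int := if n > 0 then n else 0

-- ===== PRECONDITION & SPEC =====
def Spec_fun12 (n : Int) (out : Int) : Prop := out = fun12_alt n
instance (n : Int) (out : Int) : Decidable (Spec_fun12 n out) := by unfold Spec_fun12; infer_instance

-- ===== CLAIM (what is proved, stated in full; the proofs are below) =====
def Claim_equal_fun12 : Prop := ∀ (n : Int), Dom_fun12 n → Spec_fun12 n (fun12 n)

-- ===== LEMMAS AND PROOFS =====
theorem fun12Inner_done (n m j : Int) (h : ¬ j < n) : fun12Inner n m j = (m, j) := by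
  rw [fun12Inner]; simp [h]

theorem fun12Inner_lt (n m j : Int) (h : j < n) : fun12Inner n m j = (m + (n - j), n) := by
  have hd : 0 < (n - j).toNat := by omega
  generalize hk : (n - j).toNat = k at hd
  induction k generalizing m j with
  | zero => omega
  | succ k ih =>
    rw [fun12Inner]; simp only [h, dif_pos]
    by_cases h' : j + 1 < n
    · rw [ih (m + 1) (j + 1) h' (by omega) (by omega)]
      congr 1; omega
    · rw [fun12Inner_done n (m + 1) (j + 1) h']
      congr 1 <;> omega

theorem fun12Outer_stable (n m i : Int) : fun12Outer n m i n = m := by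
  by_cases h : i < n
  · have hd : 0 < (n - i).toNat := by omega
    generalize hk : (n - i).toNat = k at hd
    induction k generalizing i with
    | zero => omega
    | succ k ih =>
      rw [fun12Outer]; simp only [h, dif_pos]
      rw [fun12Inner_done n m n (by omega)]
      show fun12Outer n m (i + 1) n = m
      by_cases h' : i + 1 < n
      · exact ih (i + 1) h' (by omega) (by omega)
      · rw [fun12Outer]; simp [h']
  · rw [fun12Outer]; simp [h]

-- ===== VERDICT (by name: the statement is the Claim_ definition above) =====
theorem fun12_spec : Claim_equal_fun12 := by
  intro n _
  unfold Spec_fun12 fun12 fun12_alt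
  by_cases h : 0 < n
  · rw [fun12Outer]; simp only [h, dif_pos]
    rw [fun12Inner_lt n 0 0 h]
    show fun12Outer n (0 + (n - 0)) (0 + 1) n = if True then n else 0
    rw [fun12Outer_stable, if_pos trivial]; omega
  · rw [fun12Outer]; simp [h]
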